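-- pv_equiv track=rewrite | github.com/immunitastx/monkeybread | src/monkeybread/util/_contact_count.py | contact_count
-- ===== SOURCE A (Python) =====
-- from typing import Dict, Set
--
-- def contact_count(contacts: Dict[str, Set[str]], group1: Set[str], group2: Set[str]) -> int:
--     """Counts contact observed by :func:`monkeybread.calc.cell_contact`.
--
--     Sums the number of unique contacts given the contact dictionary and ids corresponding to
--     cells in each group. Can be used to extract more specific contact counts out of a larger
--     dictionary.
--
--     Parameters
--     ----------
--     contacts
--         A dictionary mapping from cell indices to other cell indices, as returned by
--         :func:`monkeybread.calc.cell_contact`.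
--     group1
--         Cell indices corresponding to `group1`.
--     group2
--         Cell indices corresponding to `group2`.
--
--     Returns
--     -------
--     The number of unique contacts found between `group1` and `group2`.
--     """
--     # Sum number of g1-g2 contacts, then subtract half of the double counting that occurs when cells
--     # are in both g1 and g2
--     return sum(0 if k not in group1 else sum(v in group2 for v in values) for k, values in contacts.items()) - int(
--         0.5
--         * sum(
--             sum(k in group1 and k in group2 and v in group1 and v in group2 for v in values)
--             for k, values in contacts.items()
--         )
--     )
-- ===== SOURCE B (Python) =====
-- def contact_count(contacts, group1, group2):
--     # Inverted counting: tally value occurrences per relevant key class once,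
--     # then sum tally lookups over the target groups instead of testing each edge.
--     g1 = set(group1)
--     g2 = set(group2)
--     g12 = g1 & g2
--     tally = {}      # occurrences of each value among edges whose key is in group1
--     tally12 = {}    # same, restricted to keys in group1 & group2
--     for k, values in contacts.items():
--         if k in g1:
--             in12 = k in g12
--             for v in values:
--                 tally[v] = tally.get(v, 0) + 1
--                 if in12:
--                     tally12[v] = tally12.get(v, 0) + 1
--     term1 = sum(tally.get(v, 0) for v in g2)
--     term2 = sum(tally12.get(v, 0) for v in g12)
--     return term1 - int(0.5 * term2)
-- ===== Notes on version B (the rewrite author's own statement) =====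
-- stated objective: alternative
-- what changed: A tests every edge's endpoints against the groups in two comprehension passes; B inverts the counting: it builds per-value occurrence tallies (dicts) for edges whose key lies in group1 (and in group1&group2), then obtains each term by summing tally lookups over the target group's elements.
import Mathlib
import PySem

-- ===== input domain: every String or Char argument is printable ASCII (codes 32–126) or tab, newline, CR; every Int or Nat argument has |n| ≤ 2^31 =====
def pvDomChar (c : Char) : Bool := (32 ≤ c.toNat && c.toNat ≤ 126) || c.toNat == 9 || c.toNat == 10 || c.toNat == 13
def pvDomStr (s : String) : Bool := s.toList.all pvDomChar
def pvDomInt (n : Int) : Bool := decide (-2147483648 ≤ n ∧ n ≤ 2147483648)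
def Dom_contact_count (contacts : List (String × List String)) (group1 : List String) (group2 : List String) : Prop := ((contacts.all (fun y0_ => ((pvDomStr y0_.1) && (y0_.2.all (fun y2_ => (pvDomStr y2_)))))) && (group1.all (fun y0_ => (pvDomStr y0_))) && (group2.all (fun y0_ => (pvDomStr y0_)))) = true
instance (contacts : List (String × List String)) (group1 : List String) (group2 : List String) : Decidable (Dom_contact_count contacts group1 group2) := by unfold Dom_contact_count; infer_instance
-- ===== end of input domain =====

-- B replaces A's per-edge membership-test comprehensions by inverted counting: it builds
-- per-value occurrence tallies (dicts) for the relevant key classes once, then obtains each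
-- term by summing tally lookups over the target group's distinct elements. Same cost class.

-- ===== PORT A =====
-- A: two separate sum-comprehension passes over contacts.items(); the final
-- `int(0.5 * term2)` is ported as floor-division by 2 (term2 ≥ 0; exact there).
def contact_count (contacts : List (String × List String)) (group1 : List String) (group2 : List String) : Int :=
  (contacts.foldl (fun acc kv =>
    acc + (if ¬ group1.contains kv.1 then 0
           else kv.2.foldl (fun s v => s + (if group2.contains v then 1 else 0)) 0)) 0)
  - PySem.Int.floordiv
      (contacts.foldl (fun acc kv =>
        acc + kv.2.foldl (fun s v =>
          s + (if group1.contains kv.1 && group2.contains kv.1 && group1.contains v && group2.contains v then 1 else 0)) 0) 0) 2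

-- ===== PORT B =====
-- B: tally dicts over edges whose key is in group1 (resp. group1 & group2), then each term
-- is the sum of tally lookups over the group's set elements (a sum is order-independent,
-- so iterating the PySem.Set is exact).
def contact_count_alt (contacts : List (String × List String)) (group1 : List String) (group2 : List String) : Int :=
  let g1 : PySem.Set String := PySem.Set.ofList group1
  let g2 : PySem.Set String := PySem.Set.ofList group2
  let g12 : PySem.Set String := PySem.Set.inter g1 g2
  let st : PySem.Dict String Int × PySem.Dict String Int :=
    contacts.foldl (fun st kv =>
      if PySem.Set.contains g1 kv.1 then
        let in12 := PySem.Set.contains g12 kv.1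
        kv.2.foldl (fun st v =>
          (PySem.Dict.modify st.1 v 0 (· + 1),
           if in12 then PySem.Dict.modify st.2 v 0 (· + 1) else st.2)) st
      else st) (PySem.Dict.empty, PySem.Dict.empty)
  let term1 : Int := g2.foldl (fun s v => s + PySem.Dict.getD st.1 v 0) 0
  let term2 : Int := g12.foldl (fun s v => s + PySem.Dict.getD st.2 v 0) 0
  term1 - PySem.Int.floordiv term2 2

-- ===== PRECONDITION & SPEC =====
def Spec_contact_count (contacts : List (String × List String)) (group1 : List String) (group2 : List String) (out : Int) : Prop := out = contact_count_alt contacts group1 group2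
instance (contacts : List (String × List String)) (group1 : List String) (group2 : List String) (out : Int) : Decidable (Spec_contact_count contacts group1 group2 out) := by unfold Spec_contact_count; infer_instance

-- ===== CLAIM (what is proved, stated in full; the proofs are below) =====
def Claim_equal_contact_count : Prop := ∀ (contacts : List (String × List String)) (group1 : List String) (group2 : List String), Dom_contact_count contacts group1 group2 → Spec_contact_count contacts group1 group2 (contact_count contacts group1 group2)

-- ===== LEMMAS AND PROOFS =====

-- the multiset of edge targets whose (key, values) item satisfies c
def pvEdges (contacts : List (String × List String)) (c : String × List String → Bool) : List String :=
  contacts.flatMap (fun kv => if c kv then kv.2 else [])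

-- a foldl over a pair state with componentwise updates splits into two foldls
theorem pv_pair_foldl {α β γ : Type} (f : β → α → β) (g : γ → α → γ) (xs : List α) (a : β) (b : γ) :
    xs.foldl (fun st x => (f st.1 x, g st.2 x)) (a, b) = (xs.foldl f a, xs.foldl g b) := by
  induction xs generalizing a b with
  | nil => rfl
  | cons x xs ih => simp only [List.foldl_cons]; exact ih (f a x) (g b x)

-- the conditional tally fold counts occurrences of v among selected edges
theorem pv_tally_getD (contacts : List (String × List String)) (c : String × List String → Bool)
    (d : PySem.Dict String Int) (v : String) :
    (contacts.foldl (fun d kv => if c kv then kv.2.foldl (fun d x => PySem.Dict.modify d x 0 (· + 1)) d else d) d).getD v 0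
      = d.getD v 0 + ((pvEdges contacts c).count v : Int) := by
  induction contacts generalizing d with
  | nil => simp [pvEdges]
  | cons kv rest ih =>
    simp only [List.foldl_cons, pvEdges, List.flatMap_cons]
    by_cases h : c kv
    · simp only [h, if_pos]
      rw [ih, PySem.Dict.getD_foldl_modify_add_one]
      simp [List.count_append, pvEdges]
      ring
    · simp only [h]
      rw [ih]
      simp [pvEdges]

-- Σ over a nodup list of indicator (v = x) is the membership indicator
theorem pv_sum_ite (S : List String) (x : String) (hS : S.Nodup) :
    (S.map (fun v => if v = x then (1 : Int) else 0)).sum = if x ∈ S then 1 else 0 := by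
  induction S with
  | nil => simp
  | cons y S ih =>
    rcases List.nodup_cons.mp hS with ⟨hy, hS'⟩
    by_cases h : y = x
    · subst h
      simp [ih hS', hy]
    · have hmem : (x ∈ y :: S) = (x ∈ S) := by
        simp only [List.mem_cons, eq_iff_iff]
        constructor
        · rintro (rfl | hm)
          · exact absurd rfl h
          · exact hm
        · exact Or.inr
      simp only [List.map_cons, List.sum_cons, if_neg h, ih hS', hmem, zero_add]

-- Σ over nodup S of count v L = countP (· ∈ S) L
theorem pv_sum_count (S L : List String) (hS : S.Nodup) :
    (S.map (fun v => (L.count v : Int))).sum = (L.countP (fun x => S.contains x) : Int) := by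
  induction L with
  | nil => simp
  | cons x L ih =>
    have hmap : (S.map (fun v => ((x :: L).count v : Int)))
        = S.map (fun v => (L.count v : Int) + if v = x then 1 else 0) := by
      apply List.map_congr_left
      intro v _
      by_cases h : v = x
      · simp [h]
      · have h' : ¬ x = v := fun hh => h hh.symm
        simp [h, h']
    rw [hmap, List.sum_map_add, ih, pv_sum_ite S x hS, List.countP_cons]
    by_cases hm : x ∈ S <;> simp [hm]

-- summing per-value counts over a nodup set S counts the edges with target in S
theorem pv_term (S L : List String) (hS : S.Nodup) :
    S.foldl (fun s v => s + (L.count v : Int)) 0 = (L.countP (fun x => S.contains x) : Int) := by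
  rw [PySem.List.foldl_add, pv_sum_count S L hS]
  simp

-- set membership tests agree with list membership tests (as Bools)
theorem pv_contains_ofList (g : List String) (x : String) :
    (PySem.Set.ofList g).contains x = g.contains x := by
  by_cases h : x ∈ g <;>
    simp [PySem.Set.contains_eq_listContains, PySem.Set.mem_ofList, h]

theorem pv_contains_inter (g1 g2 : List String) (x : String) :
    ((PySem.Set.ofList g1).inter (PySem.Set.ofList g2)).contains x
      = (g1.contains x && g2.contains x) := by
  by_cases h1 : x ∈ g1 <;> by_cases h2 : x ∈ g2 <;>
    simp [PySem.Set.contains_eq_listContains, PySem.Set.mem_inter, PySem.Set.mem_ofList, h1, h2]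

-- a fold that never changes its accumulator is the accumulator
theorem pv_foldl_const {α β : Type} (xs : List α) (b : β) :
    xs.foldl (fun d _ => d) b = b := by
  induction xs generalizing b with
  | nil => rfl
  | cons x xs ih => simp only [List.foldl_cons]; exact ih b

-- B's outer pair fold splits into the two conditional tally folds
theorem pv_outer_split (c1 c2 : String → Bool) (contacts : List (String × List String))
    (a b : PySem.Dict String Int) :
    contacts.foldl (fun st kv =>
      if c1 kv.1 then
        kv.2.foldl (fun (st : PySem.Dict String Int × PySem.Dict String Int) v =>
          (PySem.Dict.modify st.1 v 0 (· + 1),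
           if c2 kv.1 then PySem.Dict.modify st.2 v 0 (· + 1) else st.2)) st
      else st) (a, b)
    = (contacts.foldl (fun d kv => if (fun kv => c1 kv.1) kv then kv.2.foldl (fun d x => PySem.Dict.modify d x 0 (· + 1)) d else d) a,
       contacts.foldl (fun d kv => if (fun kv => c1 kv.1 && c2 kv.1) kv then kv.2.foldl (fun d x => PySem.Dict.modify d x 0 (· + 1)) d else d) b) := by
  induction contacts generalizing a b with
  | nil => rfl
  | cons kv rest ih =>
    simp only [List.foldl_cons]
    by_cases h1 : c1 kv.1 <;> by_cases h2 : c2 kv.1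
    · simp only [h1, h2, Bool.and_self, if_pos]
      rw [pv_pair_foldl (fun d v => PySem.Dict.modify d v 0 (· + 1))
            (fun d v => PySem.Dict.modify d v 0 (· + 1)) kv.2 a b]
      exact ih _ _
    · simp only [h1, h2, Bool.and_false, Bool.false_eq_true, if_pos, if_false]
      rw [pv_pair_foldl (fun d v => PySem.Dict.modify d v 0 (· + 1))
            (fun (d : PySem.Dict String Int) (_ : String) => d) kv.2 a b]
      rw [pv_foldl_const]
      exact ih _ _
    all_goals
      simp only [h1, Bool.false_eq_true, if_false, Bool.false_and]
      exact ih a b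

-- A's first pass equals counting edges (key in group1) whose target is in group2
theorem pv_A_term1 (contacts : List (String × List String)) (group1 group2 : List String) :
    contacts.foldl (fun acc kv =>
      acc + (if ¬ group1.contains kv.1 then 0
             else kv.2.foldl (fun s v => s + (if group2.contains v then 1 else 0)) 0)) 0
    = ((pvEdges contacts (fun kv => group1.contains kv.1)).countP (fun v => group2.contains v) : Int) := by
  induction contacts with
  | nil => simp [pvEdges]
  | cons kv rest ih =>
    simp only [List.foldl_cons]
    rw [PySem.List.foldl_add (g := fun (kv : String × List String) =>
      (if ¬ group1.contains kv.1 then 0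
       else kv.2.foldl (fun s v => s + (if group2.contains v then 1 else 0)) 0))]
    rw [PySem.List.foldl_add (g := fun (kv : String × List String) =>
      (if ¬ group1.contains kv.1 then 0
       else kv.2.foldl (fun s v => s + (if group2.contains v then 1 else 0)) 0)) rest 0] at ih
    simp only [zero_add] at ih ⊢
    rw [ih]
    simp only [pvEdges, List.flatMap_cons, List.countP_append]
    have hin : kv.2.foldl (fun (s : Int) v => s + (if group2.contains v then 1 else 0)) 0
        = (kv.2.countP (fun v => group2.contains v) : Int) := by
      rw [PySem.List.foldl_congr_mem kv.2 _
            (fun acc x => if group2.contains x = true then acc + 1 else acc) 0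
            (fun s v _ => by by_cases hv : v ∈ group2 <;> simp [hv]),
          PySem.List.foldl_count_if]
      rw [zero_add]
    by_cases h : kv.1 ∈ group1
    · rw [hin]
      simp [h]
    · simp [h]

-- A's second pass equals counting edges (key in both groups) whose target is in both groups
theorem pv_A_term2 (contacts : List (String × List String)) (group1 group2 : List String) :
    contacts.foldl (fun acc kv =>
      acc + kv.2.foldl (fun s v =>
        s + (if group1.contains kv.1 && group2.contains kv.1 && group1.contains v && group2.contains v then 1 else 0)) 0) 0
    = ((pvEdges contacts (fun kv => group1.contains kv.1 && group2.contains kv.1)).countP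
        (fun v => group1.contains v && group2.contains v) : Int) := by
  induction contacts with
  | nil => simp [pvEdges]
  | cons kv rest ih =>
    simp only [List.foldl_cons]
    rw [PySem.List.foldl_add (g := fun (kv : String × List String) =>
      kv.2.foldl (fun s v =>
        s + (if group1.contains kv.1 && group2.contains kv.1 && group1.contains v && group2.contains v then 1 else 0)) 0)]
    rw [PySem.List.foldl_add (g := fun (kv : String × List String) =>
      kv.2.foldl (fun s v =>
        s + (if group1.contains kv.1 && group2.contains kv.1 && group1.contains v && group2.contains v then 1 else 0)) 0) rest 0] at ih
    simp only [zero_add] at ih ⊢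
    rw [ih]
    simp only [pvEdges, List.flatMap_cons, List.countP_append]
    by_cases h1 : kv.1 ∈ group1 <;> by_cases h2 : kv.1 ∈ group2
    · have hin : kv.2.foldl (fun (s : Int) v =>
          s + (if group1.contains kv.1 && group2.contains kv.1 && group1.contains v && group2.contains v then 1 else 0)) 0
          = (kv.2.countP (fun v => group1.contains v && group2.contains v) : Int) := by
        rw [PySem.List.foldl_congr_mem kv.2 _
              (fun acc x => if (group1.contains x && group2.contains x) = true then acc + 1 else acc) 0
              (fun s v _ => by
                by_cases hv1 : v ∈ group1 <;> by_cases hv2 : v ∈ group2 <;> simp [h1, h2, hv1, hv2]),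
            PySem.List.foldl_count_if]
        rw [zero_add]
      rw [hin]
      simp [h1, h2]
    all_goals
      have hzero : kv.2.foldl (fun (s : Int) v =>
          s + (if group1.contains kv.1 && group2.contains kv.1 && group1.contains v && group2.contains v then 1 else 0)) 0
          = 0 := by
        rw [PySem.List.foldl_congr_mem kv.2 _ (fun s _ => s) 0
              (fun s v _ => by simp [h1, h2]),
            pv_foldl_const]
      rw [hzero]
      simp [h1, h2]

-- B's closed form: each term counts selected edges with target in the group set
theorem pv_alt_eq (contacts : List (String × List String)) (group1 group2 : List String) :
    contact_count_alt contacts group1 group2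
      = ((pvEdges contacts (fun kv => group1.contains kv.1)).countP
            (fun v => group2.contains v) : Int)
        - PySem.Int.floordiv
            ((pvEdges contacts (fun kv => group1.contains kv.1 && group2.contains kv.1)).countP
              (fun v => group1.contains v && group2.contains v) : Int) 2 := by
  unfold contact_count_alt
  simp only [pv_contains_ofList, pv_contains_inter]
  rw [pv_outer_split (fun k => group1.contains k) (fun k => group1.contains k && group2.contains k) contacts PySem.Dict.empty PySem.Dict.empty]
  rw [PySem.List.foldl_congr_mem contacts
        (fun d kv => if (fun kv => group1.contains kv.1 && (group1.contains kv.1 && group2.contains kv.1)) kv = true then kv.2.foldl (fun d x => PySem.Dict.modify d x 0 (· + 1)) d else d)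
        (fun d kv => if (fun kv => group1.contains kv.1 && group2.contains kv.1) kv = true then kv.2.foldl (fun d x => PySem.Dict.modify d x 0 (· + 1)) d else d)
        PySem.Dict.empty
        (fun d kv _ => by
          by_cases ha : kv.1 ∈ group1 <;> by_cases hb : kv.1 ∈ group2 <;> simp [ha, hb])]
  rw [PySem.List.foldl_congr_mem (PySem.Set.ofList group2 : List String) _
        (fun s v => s + (((pvEdges contacts (fun kv => group1.contains kv.1)).count v : Nat) : Int)) 0
        (fun acc v _ => by
          rw [pv_tally_getD contacts (fun kv => group1.contains kv.1) PySem.Dict.empty v]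
          simp [PySem.Dict.getD_empty])]
  rw [PySem.List.foldl_congr_mem ((PySem.Set.ofList group1).inter (PySem.Set.ofList group2) : List String) _
        (fun s v => s + (((pvEdges contacts (fun kv => group1.contains kv.1 && group2.contains kv.1)).count v : Nat) : Int)) 0
        (fun acc v _ => by
          rw [pv_tally_getD contacts (fun kv => group1.contains kv.1 && group2.contains kv.1) PySem.Dict.empty v]
          simp [PySem.Dict.getD_empty])]
  rw [pv_term _ _ (PySem.Set.nodup_ofList group2),
      pv_term _ _ (PySem.Set.nodup_inter _ _ (PySem.Set.nodup_ofList group1))]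
  have f1 : List.countP (fun x => List.contains (PySem.Set.ofList group2 : List String) x)
        (pvEdges contacts (fun kv => group1.contains kv.1))
      = List.countP (fun v => group2.contains v)
        (pvEdges contacts (fun kv => group1.contains kv.1)) :=
    List.countP_congr (fun x _ => by
      simp [PySem.Set.mem_ofList])
  have f2 : List.countP (fun x => List.contains ((PySem.Set.ofList group1).inter (PySem.Set.ofList group2) : List String) x)
        (pvEdges contacts (fun kv => group1.contains kv.1 && group2.contains kv.1))
      = List.countP (fun v => group1.contains v && group2.contains v)
        (pvEdges contacts (fun kv => group1.contains kv.1 && group2.contains kv.1)) :=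
    List.countP_congr (fun x _ => by
      simp [PySem.Set.mem_inter, PySem.Set.mem_ofList])
  rw [f1, f2]

theorem contact_count_eq (contacts : List (String × List String)) (group1 group2 : List String) :
    contact_count contacts group1 group2 = contact_count_alt contacts group1 group2 := by
  rw [pv_alt_eq]
  unfold contact_count
  rw [pv_A_term1, pv_A_term2]

-- ===== VERDICT (by name: the statement is the Claim_ definition above) =====
theorem contact_count_spec : Claim_equal_contact_count := by
  intro contacts group1 group2 _
  unfold Spec_contact_count
  exact contact_count_eq contacts group1 group2
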